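-- pv_equiv track=rewrite | github.com/IsaacG/Advent-of-Code | 2019/12.py | part2
-- ===== SOURCE A (Python) =====
-- import itertools
-- import math
-- from typing import List, Tuple
--
-- class Moon:
--   """Data wrapper around a "body"."""
--
--   def __init__(self, pos):
--     self.pos = list(pos)
--     self.len = len(self.pos)
--     self.vel = [0] * self.len
--
--   def __str__(self):
--     return (
--       f'pos=<x={self.pos[0]:3d}, y={self.pos[1]:3d}, z={self.pos[2]:3d}>, '
--       f'vel=<x={self.vel[0]:3d}, y={self.vel[1]:3d}, z={self.vel[2]:3d}>'
--     )
--
--   def apply_gravity(self, other):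
--     """Update the velocity of `self` based on the location of `other`."""
--     for i in range(self.len):
--       if self.pos[i] < other.pos[i]:
--         v = 1
--       elif self.pos[i] > other.pos[i]:
--         v = -1
--       else:
--         v = 0
--       self.vel[i] += v
--
--   def apply_velocity(self):
--     """Update position of `self` based on velocity."""
--     for i in range(self.len):
--       self.pos[i] += self.vel[i]
--
--   def energy(self):
--     """Total energy. Potential E * kinetic E."""
--     return sum(abs(x) for x in self.pos) * sum(abs(x) for x in self.vel)
--
-- def part2(positions: List[Tuple[int]]) -> int:
--   """Calculate how many cycles before looping back to the begining."""
--
--   def fp(moons):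
--     """Fingerprint function used to convert the moons to a suitable `seen` object."""
--     vals = []
--     for m in moons:
--       vals.extend(m.pos + m.vel)
--     return tuple(vals)
--
--   cycles = []
--   # For each axis, count how many cycles until a repeat.
--   for axis in range(len(positions[0])):
--     seen = set()
--     steps = 0
--     moons = [Moon(position[axis:axis + 1]) for position in positions]
--     fingerprint = fp(moons)
--     perms = list(itertools.permutations(moons, 2))
--
--     while fingerprint not in seen:
--       seen.add(fingerprint)
--       steps += 1
--       for a, b in perms:
--         a.apply_gravity(b)
--       for a in moons:
--         a.apply_velocity()
--       fingerprint = fp(moons)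
--
--     cycles.append(steps)
--
--   return math.lcm(*cycles)
-- ===== SOURCE B (Python) =====
-- import math
-- from typing import List, Tuple
--
--
-- def _deltas(pos):
--   """Velocity kick per *distinct* coordinate value.
--
--   Tally the coordinates into a dict value -> multiplicity, then for each
--   distinct value compute (moons strictly above) - (moons strictly below),
--   weighted by multiplicity; every moon afterwards just looks its value up,
--   so no per-moon inner scan over all other moons is needed.
--   """
--   cnt = {}
--   for q in pos:
--     cnt[q] = cnt.get(q, 0) + 1
--   delta = {}
--   for x in cnt:
--     d = 0
--     for y, c in cnt.items():
--       if y > x: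
--         d += c
--       elif y < x:
--         d -= c
--     delta[x] = d
--   return delta
--
--
-- def part2(positions: List[Tuple[int]]) -> int:
--   """Calculate how many cycles before looping back to the begining.
--
--   One single loop over time advances every axis of the whole system at once
--   (flat position/velocity lists, no Moon objects); the step map is invertible
--   and the start has zero velocities, so the first repeated state per axis is
--   the initial state, and each axis records its period the step it returns to
--   its start.  The answer is the lcm of the recorded periods.
--   """
--   axes = range(len(positions[0]))
--   starts = [[p[a] for p in positions] for a in axes]
--   pos = [list(s) for s in starts]
--   vel = [[0] * len(positions) for _ in axes]
--   periods = [None] * len(starts)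
--   steps = 0
--   while any(t is None for t in periods):
--     steps += 1
--     for a in axes:
--       if periods[a] is None:
--         delta = _deltas(pos[a])
--         vel[a] = [v + delta[p] for p, v in zip(pos[a], vel[a])]
--         pos[a] = [p + v for p, v in zip(pos[a], vel[a])]
--         if pos[a] == starts[a] and not any(vel[a]):
--           periods[a] = steps
--   return math.lcm(*periods)
-- ===== Notes on version B (the rewrite author's own statement) =====
-- stated objective: alternative
-- what changed: B replaces A's per-axis outer loops, Moon objects and O(n^2) pairwise permutation gravity passes by ONE loop over time that advances every axis of the flat system simultaneously: each step it tallies the axis coordinates into a dict value->multiplicity and computes the gravity kick once per DISTINCT value ((moons above)-(moons below), weighted by multiplicity) so the per-moon inner scan over all other moons disappears, and it detects each axis period by comparison with the initial state (valid because the step map is invertible and the start has zero velocities), finally lcm-ing the recorded …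
import Mathlib
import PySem

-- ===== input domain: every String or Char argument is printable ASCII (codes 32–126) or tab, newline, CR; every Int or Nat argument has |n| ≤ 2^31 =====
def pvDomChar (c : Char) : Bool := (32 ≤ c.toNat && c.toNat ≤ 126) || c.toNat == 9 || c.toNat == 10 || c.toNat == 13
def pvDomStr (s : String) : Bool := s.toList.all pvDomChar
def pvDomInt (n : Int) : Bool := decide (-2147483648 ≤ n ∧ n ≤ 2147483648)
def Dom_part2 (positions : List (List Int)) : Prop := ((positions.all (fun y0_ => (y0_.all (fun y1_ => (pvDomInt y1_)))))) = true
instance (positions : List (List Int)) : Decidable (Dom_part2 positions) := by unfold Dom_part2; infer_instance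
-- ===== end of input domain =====

-- B replaces A's per-axis loops, Moon objects, pairwise permutation gravity and `seen` set by ONE
-- loop over time advancing all axes at once on flat lists, with the gravity kick computed once per
-- DISTINCT coordinate through a tally dict and each axis period detected by comparison with the
-- initial state (the step map is invertible and the start has zero velocities); objective:
-- alternative (a different algorithm of similar cost).

-- Shared fuel bound making the two simulation loops total in Lean; both Pythons loop without a
-- bound, and the loops are proved to run in lockstep, so the same fuel keeps the ports equal.
def pvFuel : Nat := 1000000000

-- ===== PORT A =====
-- the if/elif/else computing `v` in Moon.apply_gravity
def pySign (a b : Int) : Int := if a < b then 1 else if a > b then -1 else 0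

-- a Moon is (pos, vel); self.len == len(pos) always.  getD-defaults are only reached on inputs
-- where the Python raises IndexError (excluded by Pre_part2).
def applyGravity (a b : List Int × List Int) : List Int × List Int :=
  (a.1, (List.range a.1.length).foldl
    (fun vel i => vel.set i (vel.getD i 0 + pySign (a.1.getD i 0) (b.1.getD i 0))) a.2)

def applyVelocity (a : List Int × List Int) : List Int × List Int :=
  ((List.range a.1.length).foldl (fun pos i => pos.set i (pos.getD i 0 + a.2.getD i 0)) a.1, a.2)

-- fingerprint: pos+vel of every moon, flattened
def fpA (moons : List (List Int × List Int)) : List Int :=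
  moons.foldl (fun vals m => vals ++ (m.1 ++ m.2)) []

-- itertools.permutations(moons, 2), as index pairs (the objects are mutated through aliases,
-- so the port updates the moon list at the first index)
def permsOf (n : Nat) : List (Nat × Nat) :=
  (List.range n).flatMap (fun i => ((List.range n).filter (fun j => j ≠ i)).map (fun j => (i, j)))

def gravPhase (perms : List (Nat × Nat)) (moons : List (List Int × List Int)) :
    List (List Int × List Int) :=
  perms.foldl
    (fun ms p => ms.set p.1 (applyGravity (ms.getD p.1 ([], [])) (ms.getD p.2 ([], [])))) moons

-- `while fingerprint not in seen: …`; `seen` is Python's hash set of fingerprints — ported as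
-- Std.HashSet (exact membership semantics; a list-backed set would make the port quadratic)
def loopA (perms : List (Nat × Nat)) : Nat → Std.HashSet (List Int) → Int →
    List (List Int × List Int) → List Int → Int
  | 0, _, steps, _, _ => steps
  | fuel + 1, seen, steps, moons, fingerprint =>
    if seen.contains fingerprint then steps
    else
      let seen' := seen.insert fingerprint
      let moons' := (gravPhase perms moons).map applyVelocity
      loopA perms fuel seen' (steps + 1) moons' (fpA moons')

-- the body of `for axis in range(len(positions[0]))`
def axisA (positions : List (List Int)) (axis : Nat) : Int :=
  let moons := positions.map (fun p =>
    (PySem.List.slice p (some (axis : Int)) (some ((axis : Int) + 1)),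
     (PySem.List.slice p (some (axis : Int)) (some ((axis : Int) + 1))).map (fun _ => 0)))
  loopA (permsOf moons.length) pvFuel (Std.HashSet.emptyWithCapacity) 0 moons (fpA moons)

def part2 (positions : List (List Int)) : Int :=
  let cycles := (List.range (positions.headD []).length).foldl
    (fun cycles axis => cycles ++ [axisA positions axis]) ([] : List Int)
  cycles.foldl (fun a c => (Int.lcm a c : Int)) 1

-- ===== PORT B =====
-- cnt = {}; for q in pos: cnt[q] = cnt.get(q, 0) + 1
def tallyB (pos : List Int) : PySem.Dict Int Int :=
  pos.foldl (fun d q => d.insert q (d.getD q 0 + 1)) PySem.Dict.empty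

-- delta = {}; for x in cnt: d = 0; for y, c in cnt.items(): …; delta[x] = d
def deltaDictB (pos : List Int) : PySem.Dict Int Int :=
  let cnt := tallyB pos
  cnt.keys.foldl
    (fun dl x => dl.insert x (cnt.items.foldl
      (fun d yc => if x < yc.1 then d + yc.2 else if yc.1 < x then d - yc.2 else d) 0))
    PySem.Dict.empty

-- vel[a] = [v + delta[p] for p, v in zip(pos[a], vel[a])]; pos[a] = [p + v for p, v in zip(…)]
-- delta[p]: the key is always present (p ∈ pos), so the getD default is unreachable
def stepAlt (pos vel : List Int) : List Int × List Int :=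
  let delta := deltaDictB pos
  let vel' := (pos.zip vel).map (fun pv => pv.2 + delta.getD pv.1 0)
  ((pos.zip vel').map (fun pv => pv.1 + pv.2), vel')

-- while any(t is None for t in periods): …   one record per axis: (start, pos, vel, period)
def loopAlt : Nat → Int → List (List Int × List Int × List Int × Option Int) → List Int
  | 0, steps, axs => axs.map (fun a => a.2.2.2.getD steps)
  | fuel + 1, steps, axs =>
    if axs.all (fun a => a.2.2.2.isSome) then axs.map (fun a => a.2.2.2.getD steps)
    else
      loopAlt fuel (steps + 1) (axs.map (fun a =>
        match a.2.2.2 with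
        | some _ => a
        | none =>
          let s := stepAlt a.2.1 a.2.2.1
          (a.1, s.1, s.2,
            if s.1 == a.1 && s.2.all (fun v => v == 0) then some (steps + 1) else none)))

def part2_alt (positions : List (List Int)) : Int :=
  let starts := (List.range (positions.headD []).length).map
    (fun a : Nat => positions.map (fun p => PySem.List.pyGetD p (a : Int) 0))
  let periods := loopAlt pvFuel 0
    (starts.map (fun s => (s, s, s.map (fun _ => (0 : Int)), (none : Option Int))))
  periods.foldl (fun t c => (Int.lcm t c : Int)) 1

-- ===== PRECONDITION & SPEC =====
-- Pre_ excludes exactly the inputs on which the Python A raises IndexError: an empty list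
-- (positions[0]), and a row shorter than the first row (moon.pos[i] of the shorter moon during
-- apply_gravity in A / p[a] in B).
def Pre_part2 (positions : List (List Int)) : Prop :=
  positions ≠ [] ∧ ∀ row ∈ positions, (positions.headD []).length ≤ row.length
instance (positions : List (List Int)) : Decidable (Pre_part2 positions) := by
  unfold Pre_part2; infer_instance

def pvWitness_part2 : List (List Int) := [[3, 1], [5, 0], [4, 2]]

def Spec_part2 (positions : List (List Int)) (out : Int) : Prop := out = part2_alt positions
instance (positions : List (List Int)) (out : Int) : Decidable (Spec_part2 positions out) := by
  unfold Spec_part2; infer_instance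

-- ===== CLAIM (what is proved, stated in full; the proofs are below) =====
def Claim_equal_part2 : Prop := ∀ (positions : List (List Int)), Dom_part2 positions →
  Pre_part2 positions → Spec_part2 positions (part2 positions)

-- ===== LEMMAS AND PROOFS =====

-- proof-side single-axis picture: per-axis state (positions, velocities), count-based deltas
def deltasB (pos : List Int) : List Int :=
  pos.map (fun x => ((pos.countP (fun q => x < q) : Int) - (pos.countP (fun q => q < x) : Int)))

def stepB (pos vel : List Int) : List Int × List Int :=
  let vel' := List.zipWith (fun v d => v + d) vel (deltasB pos)
  (List.zipWith (fun p v => p + v) pos vel', vel')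

-- proof-side single-axis loop: what B's joint loop does to one unfinished axis
def loopS (start : List Int) : Nat → Int → List Int → List Int → Int
  | 0, steps, _, _ => steps
  | fuel + 1, steps, pos, vel =>
    let s := stepB pos vel
    if s.1 == start && s.2.all (fun v => v == 0) then steps + 1
    else loopS start fuel (steps + 1) s.1 s.2

def axisS (positions : List (List Int)) (axis : Nat) : Int :=
  let start := positions.map (fun p => PySem.List.pyGetD p (axis : Int) 0)
  loopS start pvFuel 0 start (start.map (fun _ => 0))

-- ---- B's tally-dict gravity equals the count-based deltas ----

theorem itemsFold_eq_sum (x : Int) (l : List (Int × Int)) (d : Int) :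
    l.foldl (fun d yc => if x < yc.1 then d + yc.2 else if yc.1 < x then d - yc.2 else d) d
      = d + (l.map (fun yc => pySign x yc.1 * yc.2)).sum := by
  induction l generalizing d with
  | nil => simp
  | cons yc l ih =>
    rw [List.foldl_cons, ih, List.map_cons, List.sum_cons]
    simp only [pySign]
    split_ifs <;> ring

theorem sum_map_discard (f : Int → Int) (p : Int) (l : List Int) (hn : l.Nodup) (hp : p ∈ l) :
    (l.map f).sum = f p + ((PySem.Set.discard l p).map f).sum := by
  induction l with
  | nil => simp at hp
  | cons a t ih =>
    by_cases hap : a = p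
    · subst hap
      have hnt : a ∉ t := (List.nodup_cons.mp hn).1
      have hd : PySem.Set.discard (a :: t) a = t := by
        simp only [PySem.Set.discard, List.filter_cons, beq_self_eq_true, Bool.not_true,
          Bool.false_eq_true, if_false]
        exact List.filter_eq_self.mpr (fun x hx => by
          simp only [Bool.not_eq_true', beq_eq_false_iff_ne]
          exact fun h => hnt (h ▸ hx))
      rw [hd]
      simp
    · have hpt : p ∈ t := by
        rcases List.mem_cons.mp hp with h | h
        · exact absurd h.symm hap
        · exact h
      have hd : PySem.Set.discard (a :: t) p = a :: PySem.Set.discard t p := by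
        simp only [PySem.Set.discard, List.filter_cons]
        simp [hap]
      rw [hd, List.map_cons, List.sum_cons, List.map_cons, List.sum_cons,
        ih (List.nodup_cons.mp hn).2 hpt]
      ring

theorem pySign_mul_succ (x p c : Int) : pySign x p * (c + 1) = pySign x p * c + pySign x p := by
  ring

theorem sum_ofList_count (x : Int) (pos : List Int) :
    ((PySem.Set.ofList pos).map (fun k => pySign x k * (pos.count k : Int))).sum
      = (pos.map (fun q => pySign x q)).sum := by
  induction pos with
  | nil => simp [PySem.Set.ofList_nil]
  | cons p t ih =>
    rw [PySem.Set.ofList_cons, List.map_cons, List.sum_cons]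
    have hcount_ne : ∀ k ∈ PySem.Set.discard (PySem.Set.ofList t) p,
        ((p :: t).count k : Int) = (t.count k : Int) := by
      intro k hk
      have hkp : k ≠ p := (PySem.Set.mem_discard (PySem.Set.ofList t) p k).mp hk |>.2
      rw [List.count_cons]
      simp [Ne.symm hkp]
    have hmapeq : (PySem.Set.discard (PySem.Set.ofList t) p).map
          (fun k => pySign x k * ((p :: t).count k : Int))
        = (PySem.Set.discard (PySem.Set.ofList t) p).map
          (fun k => pySign x k * ((t.count k : Int))) := by
      exact List.map_congr_left (fun k hk => by rw [hcount_ne k hk])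
    rw [hmapeq]
    have hcp : ((p :: t).count p : Int) = (t.count p : Int) + 1 := by
      rw [List.count_cons]; simp
    rw [hcp, pySign_mul_succ]
    by_cases hpt : p ∈ t
    · have hmem : p ∈ PySem.Set.ofList t := (PySem.Set.mem_ofList t p).mpr hpt
      have hrem := sum_map_discard (fun k => pySign x k * ((t.count k : Int))) p
        (PySem.Set.ofList t) (PySem.Set.nodup_ofList t) hmem
      rw [List.map_cons, List.sum_cons, ← ih, hrem]
      ring
    · have hc0 : (t.count p : Int) = 0 := by
        simp [List.count_eq_zero_of_not_mem hpt]
      have hdis : PySem.Set.discard (PySem.Set.ofList t) p = PySem.Set.ofList t := by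
        apply List.filter_eq_self.mpr
        intro k hk
        have : k ∈ t := (PySem.Set.mem_ofList t k).mp hk
        simp only [Bool.not_eq_true', beq_eq_false_iff_ne]
        exact fun h => hpt (h ▸ this)
      rw [hdis, hc0, List.map_cons, List.sum_cons, ← ih]
      ring

theorem getD_foldl_insert_mem (g : Int → Int) (ks : List Int) (dl : PySem.Dict Int Int) (p : Int) :
    (ks.foldl (fun dl x => dl.insert x (g x)) dl).getD p 0
      = if p ∈ ks then g p else dl.getD p 0 := by
  induction ks generalizing dl with
  | nil => simp
  | cons x ks ih =>
    rw [List.foldl_cons, ih]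
    by_cases hks : p ∈ ks
    · simp [hks]
    · by_cases hx : p = x
      · subst hx
        simp [hks]
      · simp [hks, hx, PySem.Dict.getD_insert]

-- sum of pySign equals the count difference the proof-side deltas use
theorem sum_pySign (x : Int) (l : List Int) :
    (l.map (fun q => pySign x q)).sum
      = ((l.countP (fun q => x < q) : Int) - (l.countP (fun q => q < x) : Int)) := by
  induction l with
  | nil => simp
  | cons a l ih =>
    rw [List.map_cons, List.sum_cons, ih]
    rcases lt_trichotomy x a with h | h | h
    · simp [pySign, h, not_lt_of_gt h]; omega
    · simp [pySign, h]
    · simp [pySign, h, not_lt_of_gt h]; omega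

theorem deltaDictB_lookup (pos : List Int) (p : Int) (hp : p ∈ pos) :
    (deltaDictB pos).getD p 0
      = ((pos.countP (fun q => p < q) : Int) - (pos.countP (fun q => q < p) : Int)) := by
  have htally : tallyB pos = PySem.Dict.counter pos :=
    PySem.Dict.foldl_insert_getD_add_one_eq_counter pos
  have hkeys : (tallyB pos).keys = PySem.Set.ofList pos := by
    rw [htally, PySem.Dict.keys_counter]
  have hmem : p ∈ (tallyB pos).keys := by
    rw [hkeys]; exact (PySem.Set.mem_ofList pos p).mpr hp
  unfold deltaDictB
  rw [getD_foldl_insert_mem, if_pos hmem, itemsFold_eq_sum, htally,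
    PySem.Dict.items_counter, List.map_map]
  have : ((fun yc : Int × Int => pySign p yc.1 * yc.2) ∘ fun k => (k, (pos.count k : Int)))
      = fun k => pySign p k * (pos.count k : Int) := rfl
  rw [this, sum_ofList_count, sum_pySign]
  ring

theorem map_zip_eq_zipWith {α β γ : Type} (as : List α) (bs : List β) (F : α × β → γ) :
    (as.zip bs).map F = List.zipWith (fun a b => F (a, b)) as bs := by
  simp [List.zip, List.map_zipWith]

theorem stepAlt_eq (pos vel : List Int) : stepAlt pos vel = stepB pos vel := by
  have hvel : (pos.zip vel).map (fun pv => pv.2 + (deltaDictB pos).getD pv.1 0)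
      = List.zipWith (fun v d => v + d) vel (deltasB pos) := by
    rw [map_zip_eq_zipWith, deltasB, List.zipWith_map_right]
    rw [List.zipWith_comm]
    apply List.ext_getElem
    · simp
    · intro i h1 h2
      simp only [List.getElem_zipWith]
      rw [deltaDictB_lookup pos (pos[i]'(by simp at h1; omega)) (by
        exact List.getElem_mem _)]
  show ((pos.zip ((pos.zip vel).map (fun pv => pv.2 + (deltaDictB pos).getD pv.1 0))).map
      (fun pv => pv.1 + pv.2),
    (pos.zip vel).map (fun pv => pv.2 + (deltaDictB pos).getD pv.1 0)) = stepB pos vel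
  rw [hvel]
  show ((pos.zip (List.zipWith (fun v d => v + d) vel (deltasB pos))).map (fun pv => pv.1 + pv.2),
      _) = _
  rw [map_zip_eq_zipWith]
  rfl

-- ---- B's joint loop is the single-axis loop on every axis ----

theorem loopAlt_proj (fuel : Nat) : ∀ (steps : Int)
    (axs : List (List Int × List Int × List Int × Option Int)),
    loopAlt fuel steps axs
      = axs.map (fun a => match a.2.2.2 with
          | some p => p
          | none => loopS a.1 fuel steps a.2.1 a.2.2.1) := by
  induction fuel with
  | zero =>
    intro steps axs
    simp only [loopAlt]
    apply List.map_congr_left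
    intro a _
    cases h : a.2.2.2 <;> simp [loopS]
  | succ fuel ih =>
    intro steps axs
    rw [loopAlt]
    by_cases hall : axs.all (fun a => a.2.2.2.isSome) = true
    · rw [if_pos hall]
      apply List.map_congr_left
      intro a ha
      have hs := (List.all_eq_true.mp hall) a ha
      cases h : a.2.2.2 with
      | none => rw [h] at hs; simp at hs
      | some p => simp
    · rw [if_neg hall, ih, List.map_map]
      apply List.map_congr_left
      intro a _
      cases h : a.2.2.2 with
      | some p => simp [Function.comp, h]
      | none =>
        simp only [Function.comp, h, stepAlt_eq]
        by_cases hg : ((stepB a.2.1 a.2.2.1).1 == a.1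
            && (stepB a.2.1 a.2.2.1).2.all (fun v => v == 0)) = true
        · rw [if_pos hg]
          show (steps + 1) = loopS a.1 (fuel + 1) steps a.2.1 a.2.2.1
          rw [loopS]
          simp only [if_pos hg]
        · rw [if_neg hg]
          show loopS a.1 fuel (steps + 1) (stepB a.2.1 a.2.2.1).1 (stepB a.2.1 a.2.2.1).2
              = loopS a.1 (fuel + 1) steps a.2.1 a.2.2.1
          rw [loopS]
          simp only [if_neg hg]

theorem part2_alt_eq_fold (positions : List (List Int)) :
    part2_alt positions = (List.range (positions.headD []).length).foldl
      (fun t axis => (Int.lcm t (axisS positions axis) : Int)) 1 := by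
  show (loopAlt pvFuel 0 ((((List.range (positions.headD []).length).map
      (fun a : Nat => positions.map (fun p => PySem.List.pyGetD p (a : Int) 0))).map
      (fun s => (s, s, s.map (fun _ => (0 : Int)), (none : Option Int)))))).foldl
      (fun t c => (Int.lcm t c : Int)) 1 = _
  rw [loopAlt_proj, List.map_map, List.map_map, List.foldl_map]
  rfl

-- ---- the A-side machinery: A's moons are packaging of the flat per-axis state ----

def moonsOf (ps vs : List Int) : List (List Int × List Int) :=
  List.zipWith (fun p v => ([p], [v])) ps vs

def FB (s : List Int × List Int) : List Int × List Int := stepB s.1 s.2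

def stateOK (n : Nat) (s : List Int × List Int) : Prop := s.1.length = n ∧ s.2.length = n

theorem length_deltasB (ps : List Int) : (deltasB ps).length = ps.length := by
  simp [deltasB]

theorem FB_ok {n : Nat} {s : List Int × List Int} (h : stateOK n s) : stateOK n (FB s) := by
  obtain ⟨h1, h2⟩ := h
  simp [stateOK, FB, stepB, length_deltasB, h1, h2]

theorem iterate_FB_ok {n : Nat} {s : List Int × List Int} (h : stateOK n s) (t : Nat) :
    stateOK n (FB^[t] s) := by
  induction t with
  | zero => simpa
  | succ t ih => rw [Function.iterate_succ_apply']; exact FB_ok ih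

theorem pySign_self (x : Int) : pySign x x = 0 := by simp [pySign]

-- interleaved fingerprint of a flat state
def itl : List Int → List Int → List Int
  | p :: ps, v :: vs => p :: v :: itl ps vs
  | _, _ => []

-- the velocity updates the gravity phase performs, as a pure fold on the velocity list
def velFold (ps : List Int) (L : List (Nat × Nat)) (vs : List Int) : List Int :=
  L.foldl (fun vs p => vs.set p.1 (vs.getD p.1 0 + pySign (ps.getD p.1 0) (ps.getD p.2 0))) vs

def pairSum (ps : List Int) (m : Nat) (L : List (Nat × Nat)) : Int :=
  ((L.filter (fun p => p.1 = m)).map (fun p => pySign (ps.getD m 0) (ps.getD p.2 0))).sum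

theorem applyGravity_single (a b c d : Int) :
    applyGravity ([a], [b]) ([c], [d]) = ([a], [b + pySign a c]) := by
  simp [applyGravity]

theorem applyVelocity_single (a b : Int) : applyVelocity ([a], [b]) = ([a + b], [b]) := by
  simp [applyVelocity]

theorem length_moonsOf (ps vs : List Int) (h : ps.length = vs.length) :
    (moonsOf ps vs).length = ps.length := by
  simp [moonsOf, h]

theorem moonsOf_getElem (ps vs : List Int) (i : Nat) (h : i < (moonsOf ps vs).length) :
    (moonsOf ps vs)[i] = ([ps[i]'(by simp [moonsOf] at h; omega)], [vs[i]'(by simp [moonsOf] at h; omega)]) := by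
  simp [moonsOf]

theorem moonsOf_set (ps vs : List Int) (i : Nat) (hi : i < ps.length) (_h : ps.length = vs.length) (x : Int) :
    (moonsOf ps vs).set i ([ps[i]], [x]) = moonsOf ps (vs.set i x) := by
  apply List.ext_getElem
  · simp [moonsOf]
  · intro k hk1 hk2
    simp only [moonsOf] at *
    by_cases hik : k = i
    · subst hik
      simp_all
    · simp [Ne.symm hik]

theorem mem_permsOf {n : Nat} {p : Nat × Nat} (h : p ∈ permsOf n) : p.1 < n ∧ p.2 < n := by
  simp only [permsOf, List.mem_flatMap, List.mem_map, List.mem_filter, List.mem_range] at h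
  obtain ⟨i, hi, j, ⟨hj, _⟩, rfl⟩ := h
  exact ⟨hi, hj⟩

theorem gravPhase_eq_velFold (ps : List Int) (L : List (Nat × Nat))
    (hL : ∀ p ∈ L, p.1 < ps.length ∧ p.2 < ps.length) (vs : List Int) (h : ps.length = vs.length) :
    gravPhase L (moonsOf ps vs) = moonsOf ps (velFold ps L vs) := by
  induction L generalizing vs with
  | nil => rfl
  | cons q L ih =>
    obtain ⟨i, j⟩ := q
    obtain ⟨hi, hj⟩ := hL (i, j) (by simp)
    have hiv : i < vs.length := h ▸ hi
    have hgd : ∀ k, (hk : k < ps.length) → (moonsOf ps vs).getD k ([], []) = ([ps[k]], [vs[k]'(h ▸ hk)]) := by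
      intro k hk
      rw [List.getD_eq_getElem _ _ (by rw [length_moonsOf ps vs h]; exact hk), moonsOf_getElem]
    have hA : gravPhase ((i, j) :: L) (moonsOf ps vs)
        = gravPhase L ((moonsOf ps vs).set i (applyGravity ((moonsOf ps vs).getD i ([], []))
            ((moonsOf ps vs).getD j ([], [])))) := rfl
    have hV : velFold ps ((i, j) :: L) vs
        = velFold ps L (vs.set i (vs.getD i 0 + pySign (ps.getD i 0) (ps.getD j 0))) := rfl
    rw [hA, hgd i hi, hgd j hj, applyGravity_single, moonsOf_set ps vs i hi h,
      ih (fun p hp => hL p (List.mem_cons_of_mem _ hp)) _ (by simp [h]), hV,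
      List.getD_eq_getElem vs 0 hiv, List.getD_eq_getElem ps 0 hi, List.getD_eq_getElem ps 0 hj]

theorem length_velFold (ps : List Int) (L : List (Nat × Nat)) (vs : List Int) :
    (velFold ps L vs).length = vs.length := by
  induction L generalizing vs with
  | nil => rfl
  | cons p L ih => simp [velFold] at ih ⊢; rw [ih, List.length_set]

theorem velFold_getElem? (ps : List Int) (L : List (Nat × Nat)) (vs : List Int) (m : Nat) :
    (velFold ps L vs)[m]? = vs[m]?.map (· + pairSum ps m L) := by
  induction L generalizing vs with
  | nil =>
    simp [velFold, pairSum]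
  | cons q L ih =>
    obtain ⟨i, j⟩ := q
    have hV : velFold ps ((i, j) :: L) vs
        = velFold ps L (vs.set i (vs.getD i 0 + pySign (ps.getD i 0) (ps.getD j 0))) := rfl
    rw [hV, ih]
    by_cases him : i = m
    · subst him
      have hset : (vs.set i (vs.getD i 0 + pySign (ps.getD i 0) (ps.getD j 0)))[i]?
          = vs[i]?.map (· + pySign (ps.getD i 0) (ps.getD j 0)) := by
        by_cases hm : i < vs.length
        · simp [hm]
        · have hle := Nat.le_of_not_lt hm
          simp [List.set_eq_of_length_le hle, List.getElem?_eq_none hle]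
      rw [hset, Option.map_map]
      have hps : pairSum ps i ((i, j) :: L)
          = pySign (ps.getD i 0) (ps.getD j 0) + pairSum ps i L := by
        simp [pairSum]
      rw [hps]
      cases vs[i]? <;> simp
    · rw [List.getElem?_set_ne (by omega)]
      have hps : pairSum ps m ((i, j) :: L) = pairSum ps m L := by
        simp [pairSum, him]
      rw [hps]

theorem filter_permsOf (n m : Nat) (hm : m < n) :
    (permsOf n).filter (fun p => p.1 = m)
      = ((List.range n).filter (fun j => j ≠ m)).map (fun j => (m, j)) := by
  have key : ∀ l : List Nat,
      ((l.flatMap (fun i => ((List.range n).filter (fun j => j ≠ i)).map (fun j => (i, j)))).filter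
          (fun p => p.1 = m))
        = (l.filter (fun i => i = m)).flatMap
            (fun i => ((List.range n).filter (fun j => j ≠ i)).map (fun j => (i, j))) := by
    intro l
    induction l with
    | nil => rfl
    | cons a l ihl =>
      rw [List.flatMap_cons, List.filter_append, ihl, List.filter_cons]
      by_cases ham : a = m
      · subst ham
        simp [List.filter_map, Function.comp]
      · simp [List.filter_map, Function.comp, ham]
  have hrange : ∀ k : Nat, m < k → (List.range k).filter (fun i => i = m) = [m] := by
    intro k hk
    induction k with
    | zero => omega
    | succ k ihk =>
      rw [List.range_succ, List.filter_append, List.filter_cons]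
      by_cases hkm : m = k
      · subst hkm
        have : (List.range m).filter (fun i => i = m) = [] := by
          apply List.filter_eq_nil_iff.mpr
          intro a ha
          simp only [List.mem_range] at ha
          simp; omega
        simp [this]
      · have hmk : m < k := by omega
        simp [ihk hmk, Ne.symm hkm]
  rw [permsOf, key, hrange n hm]
  simp

theorem map_range_getD (l : List Int) :
    (List.range l.length).map (fun j => l.getD j 0) = l := by
  apply List.ext_getElem
  · simp
  · intro k hk1 hk2
    simp [List.getD_eq_getElem?_getD, List.getElem?_eq_getElem hk2]

theorem sum_filter_ne (g : Nat → Int) (i : Nat) (hg : g i = 0) (l : List Nat) :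
    ((l.filter (fun j => j ≠ i)).map g).sum = (l.map g).sum := by
  induction l with
  | nil => rfl
  | cons a l ih =>
    simp only [ne_eq, decide_not] at ih ⊢
    by_cases ha : a = i
    · subst ha; simp [hg, ih]
    · simp [ha, ih]

theorem pairSum_permsOf (ps : List Int) (m : Nat) (hm : m < ps.length) :
    pairSum ps m (permsOf ps.length) = (ps.map (fun q => pySign (ps.getD m 0) q)).sum := by
  obtain ⟨x, hx⟩ : ∃ x, ps.getD m 0 = x := ⟨_, rfl⟩
  rw [pairSum, filter_permsOf ps.length m hm, List.map_map, hx]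
  have h1 : ((fun p : Nat × Nat => pySign x (ps.getD p.2 0)) ∘ fun j => (m, j))
      = fun j => pySign x (ps.getD j 0) := rfl
  rw [h1, sum_filter_ne _ m (by rw [← hx]; exact pySign_self _)]
  have h2 : ps.map (fun q => pySign x q) = (List.range ps.length).map (fun j => pySign x (ps.getD j 0)) := by
    conv_lhs => rw [← map_range_getD ps]
    rw [List.map_map]
    rfl
  rw [h2]

theorem velFold_permsOf (ps vs : List Int) (h : ps.length = vs.length) :
    velFold ps (permsOf ps.length) vs = List.zipWith (fun v d => v + d) vs (deltasB ps) := by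
  apply List.ext_getElem
  · simp [length_velFold, deltasB, h]
  · intro m hm1 hm2
    have hmv : m < vs.length := by rwa [length_velFold] at hm1
    have hmp : m < ps.length := h ▸ hmv
    have h? := velFold_getElem? ps (permsOf ps.length) vs m
    rw [List.getElem?_eq_getElem hm1, List.getElem?_eq_getElem hmv] at h?
    simp only [Option.map_some] at h?
    have hval := Option.some.inj h?
    rw [hval, pairSum_permsOf ps m hmp, sum_pySign]
    rw [List.getElem_zipWith]
    simp [deltasB, List.getD_eq_getElem?_getD, List.getElem?_eq_getElem hmp]

theorem map_applyVelocity (ps vs : List Int) :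
    (moonsOf ps vs).map applyVelocity = moonsOf (List.zipWith (fun p v => p + v) ps vs) vs := by
  induction ps generalizing vs with
  | nil => simp [moonsOf]
  | cons p ps ih =>
    cases vs with
    | nil => simp [moonsOf]
    | cons v vs => simp [moonsOf, applyVelocity_single] at ih ⊢; exact ih vs

-- one whole advance of A's moons is one flat step
theorem stepA_eq (ps vs : List Int) (h : ps.length = vs.length) :
    (gravPhase (permsOf ps.length) (moonsOf ps vs)).map applyVelocity
      = moonsOf (stepB ps vs).1 (stepB ps vs).2 := by
  rw [gravPhase_eq_velFold ps (permsOf ps.length) (fun p hp => mem_permsOf hp) vs h,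
    velFold_permsOf ps vs h, map_applyVelocity]
  rfl

theorem fpA_moonsOf (ps vs : List Int) : fpA (moonsOf ps vs) = itl ps vs := by
  rw [fpA, PySem.List.foldl_append_eq_flatMap, List.nil_append]
  induction ps generalizing vs with
  | nil => cases vs <;> simp [moonsOf, itl]
  | cons p ps ih =>
    cases vs with
    | nil => simp [moonsOf, itl]
    | cons v vs => simp [moonsOf, itl] at ih ⊢; exact ih vs

theorem itl_inj {ps vs ps' vs' : List Int} (h : itl ps vs = itl ps' vs')
    (h1 : ps.length = vs.length) (h2 : ps'.length = vs'.length) : ps = ps' ∧ vs = vs' := by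
  induction ps generalizing vs ps' vs' with
  | nil =>
    cases vs with
    | cons _ _ => simp at h1
    | nil =>
      cases ps' with
      | nil =>
        cases vs' with
        | nil => exact ⟨rfl, rfl⟩
        | cons _ _ => simp at h2
      | cons _ _ =>
        cases vs' with
        | nil => simp at h2
        | cons _ _ => simp [itl] at h
  | cons p ps ih =>
    cases vs with
    | nil => simp at h1
    | cons v vs =>
      cases ps' with
      | nil =>
        cases vs' with
        | nil => simp [itl] at h
        | cons _ _ => simp at h2
      | cons p' ps' =>
        cases vs' with
        | nil => simp at h2
        | cons v' vs' =>
          simp only [itl, List.cons.injEq] at h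
          obtain ⟨hp, hv, hrest⟩ := h
          simp only [List.length_cons, Nat.add_right_cancel_iff] at h1 h2
          obtain ⟨hps, hvs⟩ := ih hrest h1 h2
          exact ⟨by rw [hp, hps], by rw [hv, hvs]⟩

theorem FB_inj {n : Nat} {s t : List Int × List Int} (hs : stateOK n s) (ht : stateOK n t)
    (h : FB s = FB t) : s = t := by
  have recover : ∀ (a b : List Int), a.length = b.length →
      List.zipWith (fun x y => x - y) (List.zipWith (fun x y => x + y) a b) b = a := by
    intro a
    induction a with
    | nil => intro b hb; simp
    | cons x a iha =>
      intro b hb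
      cases b with
      | nil => simp at hb
      | cons y b => simp at hb ⊢; exact iha b hb
  obtain ⟨ps, vs⟩ := s
  obtain ⟨ps', vs'⟩ := t
  obtain ⟨hs1, hs2⟩ := hs
  obtain ⟨ht1, ht2⟩ := ht
  simp only [FB, stepB, Prod.mk.injEq] at h
  obtain ⟨hpos, hvel⟩ := h
  have hlv : (List.zipWith (fun v d => v + d) vs (deltasB ps)).length = n := by
    simp [length_deltasB, hs1, hs2]
  have hlv' : (List.zipWith (fun v d => v + d) vs' (deltasB ps')).length = n := by
    simp [length_deltasB, ht1, ht2]
  have hps : ps = ps' := by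
    have e1 := recover ps (List.zipWith (fun v d => v + d) vs (deltasB ps)) (by rw [hs1, hlv])
    have e2 := recover ps' (List.zipWith (fun v d => v + d) vs' (deltasB ps')) (by rw [ht1, hlv'])
    rw [← e1, ← e2, hpos, hvel]
  subst hps
  have hvs : vs = vs' := by
    have e1 := recover vs (deltasB ps) (by rw [hs2, length_deltasB, hs1])
    have e2 := recover vs' (deltasB ps) (by rw [ht2, length_deltasB, hs1])
    rw [← e1, ← e2, hvel]
  rw [hvs]

theorem iterate_FB_inj {n : Nat} {s : List Int × List Int} (hs : stateOK n s) (r : Nat)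
    {t : List Int × List Int} (ht : stateOK n t) (h : FB^[r] s = FB^[r] t) : s = t := by
  induction r with
  | zero => simpa using h
  | succ r ih =>
    rw [Function.iterate_succ_apply', Function.iterate_succ_apply'] at h
    exact ih (FB_inj (iterate_FB_ok hs r) (iterate_FB_ok ht r) h)

-- the single-axis break test recognises exactly the initial state
theorem loopS_guard (start : List Int) (s : List Int × List Int)
    (hok : stateOK start.length s) :
    ((s.1 == start && s.2.all (fun v => v == 0)) = true)
      ↔ s = (start, start.map (fun _ => 0)) := by
  obtain ⟨ps, vs⟩ := s
  obtain ⟨h1, h2⟩ := hok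
  simp only [Bool.and_eq_true, beq_iff_eq, List.all_eq_true, Prod.mk.injEq]
  constructor
  · rintro ⟨hp, hv⟩
    refine ⟨hp, ?_⟩
    have : vs = List.replicate start.length 0 := by
      rw [List.eq_replicate_iff]
      exact ⟨h2, fun b hb => by simpa using hv b hb⟩
    rw [this, List.map_const']
  · rintro ⟨hp, hv⟩
    refine ⟨hp, fun v hv' => ?_⟩
    rw [hv] at hv'
    simp only [List.mem_map] at hv'
    obtain ⟨_, _, rfl⟩ := hv'
    simp

theorem set_contains_eq_false (s : Std.HashSet (List Int)) (x : List Int)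
    (h : x ∉ s) : s.contains x = false := by
  cases hc : s.contains x
  · rfl
  · exact absurd (Std.HashSet.contains_iff_mem.mp hc) h

-- A's loop and the single-axis loop run in lockstep
theorem lockstep (start : List Int) (fuel : Nat) :
    ∀ (t : Nat) (seen : Std.HashSet (List Int)),
    (∀ r : Nat, 0 < r → r ≤ t → FB^[r] (start, start.map (fun _ => 0)) ≠ (start, start.map (fun _ => 0))) →
    (∀ x ∈ seen, ∃ r < t, x = itl (FB^[r] (start, start.map (fun _ => 0))).1 (FB^[r] (start, start.map (fun _ => 0))).2) →
    (0 < t → itl start (start.map (fun _ => 0)) ∈ seen) →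
    loopA (permsOf start.length) fuel seen (t : Int)
        (moonsOf (FB^[t] (start, start.map (fun _ => 0))).1 (FB^[t] (start, start.map (fun _ => 0))).2)
        (fpA (moonsOf (FB^[t] (start, start.map (fun _ => 0))).1 (FB^[t] (start, start.map (fun _ => 0))).2))
      = loopS start fuel (t : Int) (FB^[t] (start, start.map (fun _ => 0))).1
          (FB^[t] (start, start.map (fun _ => 0))).2 := by
  induction fuel with
  | zero => intro t seen _ _ _; rfl
  | succ fuel ih =>
    intro t seen ha hb hc
    have hok0 : stateOK start.length (start, start.map (fun _ => (0 : Int))) := ⟨rfl, by simp⟩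
    have hokt : ∀ r : Nat, stateOK start.length (FB^[r] (start, start.map (fun _ => (0 : Int)))) :=
      fun r => iterate_FB_ok hok0 r
    have hfp : ∀ r : Nat, fpA (moonsOf (FB^[r] (start, start.map (fun _ => (0 : Int)))).1
        (FB^[r] (start, start.map (fun _ => (0 : Int)))).2)
        = itl (FB^[r] (start, start.map (fun _ => (0 : Int)))).1
            (FB^[r] (start, start.map (fun _ => (0 : Int)))).2 := fun r => fpA_moonsOf _ _
    -- A's membership test is false: no state before the first return to the start repeats
    have hguardA : ¬ (itl (FB^[t] (start, start.map (fun _ => (0 : Int)))).1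
        (FB^[t] (start, start.map (fun _ => (0 : Int)))).2 ∈ seen) := by
      intro hmem
      obtain ⟨r, hr, hx⟩ := hb _ hmem
      obtain ⟨hps, hvs⟩ := itl_inj hx ((hokt t).1.trans (hokt t).2.symm) ((hokt r).1.trans (hokt r).2.symm)
      have hstates : FB^[t] (start, start.map (fun _ => (0 : Int)))
          = FB^[r] (start, start.map (fun _ => (0 : Int))) := Prod.ext hps hvs
      have ht' : t = r + (t - r) := by omega
      rw [ht', Function.iterate_add_apply] at hstates
      have := iterate_FB_inj (iterate_FB_ok hok0 (t - r)) r hok0 hstates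
      exact ha (t - r) (by omega) (by omega) this
    have hcontains : seen.contains (fpA (moonsOf (FB^[t] (start, start.map (fun _ => (0 : Int)))).1
        (FB^[t] (start, start.map (fun _ => (0 : Int)))).2)) = false := by
      rw [hfp t]
      exact set_contains_eq_false seen _ hguardA
    -- one advance of the moons is one flat step
    have hstep : (gravPhase (permsOf start.length)
          (moonsOf (FB^[t] (start, start.map (fun _ => (0 : Int)))).1
            (FB^[t] (start, start.map (fun _ => (0 : Int)))).2)).map applyVelocity
        = moonsOf (FB^[t + 1] (start, start.map (fun _ => (0 : Int)))).1
            (FB^[t + 1] (start, start.map (fun _ => (0 : Int)))).2 := by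
      have hl := (hokt t).1.trans (hokt t).2.symm
      have h' := stepA_eq (FB^[t] (start, start.map (fun _ => (0 : Int)))).1
        (FB^[t] (start, start.map (fun _ => (0 : Int)))).2 hl
      rw [(hokt t).1] at h'
      rw [Function.iterate_succ_apply']
      exact h'
    rw [loopA, if_neg (by rw [hcontains]; exact Bool.false_ne_true), hstep, hfp t]
    rw [loopS]
    have hsB : stepB (FB^[t] (start, start.map (fun _ => (0 : Int)))).1
        (FB^[t] (start, start.map (fun _ => (0 : Int)))).2
        = FB^[t + 1] (start, start.map (fun _ => (0 : Int))) := by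
      rw [Function.iterate_succ_apply']
      rfl
    rw [hsB]
    by_cases hB : FB^[t + 1] (start, start.map (fun _ => (0 : Int)))
        = (start, start.map (fun _ => (0 : Int)))
    · rw [if_pos ((loopS_guard start _ (hokt (t + 1))).mpr hB)]
      -- A's next iteration sees the start fingerprint in `seen` and also returns t + 1
      have hmem' : itl (FB^[t + 1] (start, start.map (fun _ => (0 : Int)))).1
          (FB^[t + 1] (start, start.map (fun _ => (0 : Int)))).2
          ∈ seen.insert (itl (FB^[t] (start, start.map (fun _ => (0 : Int)))).1
              (FB^[t] (start, start.map (fun _ => (0 : Int)))).2) := by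
        rw [Std.HashSet.mem_insert, beq_iff_eq]
        rcases Nat.eq_zero_or_pos t with ht0 | ht0
        · left
          subst ht0
          rw [hB]
          rfl
        · right
          rw [hB]
          exact hc ht0
      cases fuel with
      | zero => rfl
      | succ fuel' =>
        rw [loopA, if_pos (by rw [hfp (t + 1)]; exact Std.HashSet.contains_iff_mem.mpr hmem')]
    · rw [if_neg (fun hcon => hB ((loopS_guard start _ (hokt (t + 1))).mp hcon))]
      have hrec := ih (t + 1) (seen.insert (itl (FB^[t] (start, start.map (fun _ => (0 : Int)))).1
          (FB^[t] (start, start.map (fun _ => (0 : Int)))).2))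
        (by
          intro r hr1 hr2
          rcases Nat.lt_or_ge r (t + 1) with hlt | hge
          · exact ha r hr1 (by omega)
          · have hrt : r = t + 1 := by omega
            subst hrt
            exact hB)
        (by
          intro x hx
          rw [Std.HashSet.mem_insert, beq_iff_eq] at hx
          rcases hx with hx | hx
          · exact ⟨t, by omega, hx.symm⟩
          · obtain ⟨r, hr, hxr⟩ := hb x hx
            exact ⟨r, by omega, hxr⟩)
        (by
          intro _
          rw [Std.HashSet.mem_insert, beq_iff_eq]
          rcases Nat.eq_zero_or_pos t with ht0 | ht0
          · left
            subst ht0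
            rfl
          · right
            exact hc ht0)
      rw [show ((t : Int) + 1) = ((t + 1 : Nat) : Int) by push_cast; ring]
      exact hrec

theorem axis_eq (positions : List (List Int)) (axis : Nat)
    (hax : ∀ row ∈ positions, axis < row.length) :
    axisA positions axis = axisS positions axis := by
  have hslice : ∀ p ∈ positions,
      PySem.List.slice p (some (axis : Int)) (some ((axis : Int) + 1)) = [p.getD axis 0] := by
    intro p hp
    have hl := hax p hp
    have h1 : ((axis : Int) + 1) = ((axis : Int) + ((1 : Nat) : Int)) := by norm_num
    rw [h1, PySem.List.slice_natCast_add, List.drop_eq_getElem_cons hl,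
      List.getD_eq_getElem p 0 hl]
    rfl
  have hmoons : positions.map (fun p =>
      (PySem.List.slice p (some (axis : Int)) (some ((axis : Int) + 1)),
       (PySem.List.slice p (some (axis : Int)) (some ((axis : Int) + 1))).map (fun _ => (0 : Int))))
      = (positions.map (fun p => p.getD axis 0)).map (fun x => ([x], [0])) := by
    rw [List.map_map]
    apply List.map_congr_left
    intro p hp
    simp [hslice p hp]
  have hm0 : ∀ l : List Int, moonsOf l (l.map (fun _ => 0)) = l.map (fun x => ([x], [0])) := by
    intro l
    induction l with
    | nil => rfl
    | cons x l ihl => simp [moonsOf] at ihl ⊢; exact ihl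
  have hstart : (positions.map (fun p => PySem.List.pyGetD p (axis : Int) 0))
      = positions.map (fun p => p.getD axis 0) := by
    simp
  simp only [axisA, axisS]
  rw [hmoons, hstart, ← hm0]
  have hlen2 : (moonsOf (positions.map (fun p => p.getD axis 0))
      ((positions.map (fun p => p.getD axis 0)).map (fun _ => (0 : Int)))).length
      = (positions.map (fun p => p.getD axis 0)).length := by
    simp [moonsOf]
  rw [hlen2]
  have hls := lockstep (positions.map (fun p => p.getD axis 0)) pvFuel 0 (Std.HashSet.emptyWithCapacity)
    (fun r hr1 hr2 => absurd (Nat.lt_of_lt_of_le hr1 hr2) (lt_irrefl 0))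
    (by intro x hx; simp at hx)
    (fun h => absurd h (lt_irrefl 0))
  simp only [Function.iterate_zero_apply, Nat.cast_zero] at hls
  exact hls

-- ===== VERDICT (by name: the statement is the Claim_ definition above) =====
theorem part2_spec : Claim_equal_part2 := by
  intro positions _hdom hpre
  obtain ⟨hne, hrows⟩ := hpre
  unfold Spec_part2
  rw [part2_alt_eq_fold]
  simp only [part2]
  rw [PySem.List.foldl_append_singleton_eq_map, List.nil_append, List.foldl_map]
  apply List.foldl_ext
  intro a axis hax
  rw [axis_eq positions axis]
  intro row hrow
  exact Nat.lt_of_lt_of_le (List.mem_range.mp hax) (hrows row hrow)
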